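-- pv_equiv track=rewrite | github.com/Vicky-cmd-run/ddr-ai-system | src/processing/merger.py | _merge_area
-- ===== SOURCE A (Python) =====
-- AREA_TERMS = (
--     ("master bedroom bathroom", "Master Bedroom Bathroom"),
--     ("mb bathroom", "Master Bedroom Bathroom"),
--     ("common bathroom", "Common Bathroom"),
--     ("external wall", "External Wall"),
--     ("parking area", "Parking Area"),
--     ("master bedroom", "Master Bedroom"),
--     ("common bedroom", "Bedroom"),
--     ("staircase", "Staircase"),
--     ("balcony", "Balcony"),
--     ("terrace", "Terrace"),
--     ("passage", "Passage"),
--     ("bathroom", "Bathroom"),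
--     ("bedroom", "Bedroom"),
--     ("kitchen", "Kitchen"),
--     ("parking", "Parking Area"),
--     ("ceiling", "Ceiling Area"),
--     ("hall", "Hall"),
-- )
--
-- def _merge_area(observation: str, sequential_index: int) -> str:
--     lowered = observation.lower()
--     matches = []
--     for term, canonical in AREA_TERMS:
--         position = lowered.find(term)
--         if position >= 0:
--             matches.append((position, canonical))
--     if matches:
--         return sorted(matches, key=lambda item: item[0])[0][1]
--     return f"Unspecified_{sequential_index}"
-- ===== SOURCE B (Python) =====
-- AREA_TERMS = (
--     ("master bedroom bathroom", "Master Bedroom Bathroom"),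
--     ("mb bathroom", "Master Bedroom Bathroom"),
--     ("common bathroom", "Common Bathroom"),
--     ("external wall", "External Wall"),
--     ("parking area", "Parking Area"),
--     ("master bedroom", "Master Bedroom"),
--     ("common bedroom", "Bedroom"),
--     ("staircase", "Staircase"),
--     ("balcony", "Balcony"),
--     ("terrace", "Terrace"),
--     ("passage", "Passage"),
--     ("bathroom", "Bathroom"),
--     ("bedroom", "Bedroom"),
--     ("kitchen", "Kitchen"),
--     ("parking", "Parking Area"),
--     ("ceiling", "Ceiling Area"),
--     ("hall", "Hall"),
-- )
--
-- def _merge_area(observation: str, sequential_index: int) -> str: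
--     lowered = observation.lower()
--     # scan string positions left to right; the first position where any
--     # term starts decides, ties broken by AREA_TERMS order
--     for start in range(len(lowered)):
--         for term, canonical in AREA_TERMS:
--             if lowered.startswith(term, start):
--                 return canonical
--     return f"Unspecified_{sequential_index}"
-- ===== Notes on version B (the rewrite author's own statement) =====
-- stated objective: simpler
-- what changed: Replaces 'compute find() for every term, collect (position, canonical) hits, stable-sort them and take the first' by a single left-to-right scan over string positions that returns the canonical of the first AREA_TERMS entry starting at the earliest position; no hits list and no sort.
import Mathlib
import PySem

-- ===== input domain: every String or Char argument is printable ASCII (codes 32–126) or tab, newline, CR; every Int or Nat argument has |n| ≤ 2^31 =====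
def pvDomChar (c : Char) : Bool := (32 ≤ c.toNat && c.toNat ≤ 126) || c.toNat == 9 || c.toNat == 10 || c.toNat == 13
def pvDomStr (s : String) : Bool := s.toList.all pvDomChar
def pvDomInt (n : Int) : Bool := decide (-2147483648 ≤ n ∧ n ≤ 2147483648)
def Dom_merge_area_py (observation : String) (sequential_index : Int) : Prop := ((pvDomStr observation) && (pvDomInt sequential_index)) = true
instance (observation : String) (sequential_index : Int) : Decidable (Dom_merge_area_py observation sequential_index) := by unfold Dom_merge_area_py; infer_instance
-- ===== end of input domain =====

-- B replaces "find every term, sort the hits, take the first" by a left-to-right scan over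
-- string positions that returns the first term starting at the earliest position (objective: simpler).

-- shared module-level constant AREA_TERMS (terms as char lists, canonical names as strings)
def AREA_TERMS : List (List Char × String) :=
  [("master bedroom bathroom".toList, "Master Bedroom Bathroom"),
   ("mb bathroom".toList, "Master Bedroom Bathroom"),
   ("common bathroom".toList, "Common Bathroom"),
   ("external wall".toList, "External Wall"),
   ("parking area".toList, "Parking Area"),
   ("master bedroom".toList, "Master Bedroom"),
   ("common bedroom".toList, "Bedroom"),
   ("staircase".toList, "Staircase"),
   ("balcony".toList, "Balcony"),
   ("terrace".toList, "Terrace"),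
   ("passage".toList, "Passage"),
   ("bathroom".toList, "Bathroom"),
   ("bedroom".toList, "Bedroom"),
   ("kitchen".toList, "Kitchen"),
   ("parking".toList, "Parking Area"),
   ("ceiling".toList, "Ceiling Area"),
   ("hall".toList, "Hall")]

-- ===== PORT A =====
def merge_area_py (observation : String) (sequential_index : Int) : String :=
  let lowered := PySem.Chars.lower observation.toList
  let hits := -- Python variable `matches`
     AREA_TERMS.foldl (fun acc tc =>
    let position := PySem.Chars.find lowered tc.1
    if 0 ≤ position then acc ++ [(position, tc.2)] else acc) ([] : List (Int × String))
  if hits.isEmpty then "Unspecified_" ++ PySem.Int.toStr sequential_index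
  else ((PySem.List.sorted hits (fun it => it.1)).headD (0, "")).2

-- ===== PORT B =====
-- the inner 'for term, canonical in AREA_TERMS: if lowered.startswith(term, start)' loop
def firstTermAt : List (List Char × String) → List Char → Option String
  | [], _ => none
  | (t, c) :: rest, s => if PySem.Chars.startswith s t then some c else firstTermAt rest s

-- the outer 'for start in range(len(lowered))' loop, as structural recursion on the suffix
def posScan : List Char → Option String
  | [] => none
  | c :: rest =>
    match firstTermAt AREA_TERMS (c :: rest) with
    | some r => some r
    | none => posScan rest

def merge_area_py_alt (observation : String) (sequential_index : Int) : String :=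
  let lowered := PySem.Chars.lower observation.toList
  match posScan lowered with
  | some r => r
  | none => "Unspecified_" ++ PySem.Int.toStr sequential_index

-- ===== PRECONDITION & SPEC =====
def Spec_merge_area_py (observation : String) (sequential_index : Int) (out : String) : Prop := out = merge_area_py_alt observation sequential_index
instance (observation : String) (sequential_index : Int) (out : String) : Decidable (Spec_merge_area_py observation sequential_index out) := by unfold Spec_merge_area_py; infer_instance

-- ===== CLAIM (what is proved, stated in full; the proofs are below) =====
def Claim_equal_merge_area_py : Prop := ∀ (observation : String) (sequential_index : Int), Dom_merge_area_py observation sequential_index → Spec_merge_area_py observation sequential_index (merge_area_py observation sequential_index)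

-- ===== LEMMAS AND PROOFS =====

-- running "leftmost strict minimum by key" step; characterises the head of A's stable sort
def pvStep (acc : Option (Int × String)) (x : Int × String) : Option (Int × String) :=
  match acc with
  | none => some x
  | some q => if x.1 < q.1 then some x else some q

-- the element A's loop contributes for one (term, canonical) pair
def pvHit (cs : List Char) (tc : List Char × String) : Option (Int × String) :=
  let p := PySem.Chars.find cs tc.1
  if 0 ≤ p then some (p, tc.2) else none

lemma matches_eq (cs : List Char) (ts : List (List Char × String)) (acc : List (Int × String)) :
    ts.foldl (fun acc tc =>
      let position := PySem.Chars.find cs tc.1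
      if 0 ≤ position then acc ++ [(position, tc.2)] else acc) acc
      = acc ++ ts.filterMap (pvHit cs) := by
  induction ts generalizing acc with
  | nil => simp
  | cons tc rest ih =>
    simp only [List.foldl_cons, List.filterMap_cons, pvHit]
    split
    · rw [ih]; simp [pvHit]
    · rw [ih]; simp [pvHit]

lemma head_sorted_eq_foldl_step (xs : List (Int × String)) :
    (PySem.List.sorted xs (fun it => it.1)).head? = xs.foldl pvStep none := by
  induction xs using List.reverseRecOn with
  | nil => rfl
  | append_singleton l x ih =>
    have h1 : PySem.List.sorted (l ++ [x]) (fun it => it.1)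
        = PySem.List.insertBy (fun a b => decide (a.1 < b.1)) x
            (PySem.List.sorted l (fun it => it.1)) := by
      rw [PySem.List.sorted_eq_foldl_insertBy, PySem.List.sorted_eq_foldl_insertBy,
        List.foldl_append]
      rfl
    rw [h1, List.foldl_append, List.foldl_cons, List.foldl_nil]
    cases hs : PySem.List.sorted l (fun it => it.1) with
    | nil =>
      have hf : List.foldl pvStep none l = none := by rw [← ih, hs]; rfl
      simp [hf, PySem.List.insertBy, pvStep]
    | cons y t =>
      have hf : List.foldl pvStep none l = some y := by rw [← ih, hs]; rfl
      simp only [hf, PySem.List.insertBy, pvStep]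
      split <;> simp_all

lemma firstTermAt_none {ts : List (List Char × String)} {s : List Char}
    (h : firstTermAt ts s = none) : ∀ p ∈ ts, ¬ p.1 <+: s := by
  induction ts with
  | nil => simp
  | cons tc rest ih =>
    obtain ⟨t, c⟩ := tc
    simp only [firstTermAt] at h
    split at h
    · exact absurd h (by simp)
    · intro p hp
      rcases List.mem_cons.mp hp with rfl | hp
      · intro hps
        exact ‹¬ PySem.Chars.startswith s t = true› ((PySem.Chars.startswith_iff s t).mpr hps)
      · exact ih h p hp

lemma firstTermAt_some {ts : List (List Char × String)} {s : List Char} {r : String}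
    (h : firstTermAt ts s = some r) :
    ∃ pre t c post, ts = pre ++ (t, c) :: post ∧ r = c ∧ t <+: s ∧
      ∀ p ∈ pre, ¬ p.1 <+: s := by
  induction ts with
  | nil => simp [firstTermAt] at h
  | cons tc rest ih =>
    obtain ⟨t, c⟩ := tc
    simp only [firstTermAt] at h
    split at h
    · exact ⟨[], t, c, rest, by simp, (Option.some_inj.mp h).symm,
        (PySem.Chars.startswith_iff s t).mp ‹_›, by simp⟩
    · obtain ⟨pre, t', c', post, hts, hr, hpref, hpre⟩ := ih h
      refine ⟨(t, c) :: pre, t', c', post, by simp [hts], hr, hpref, ?_⟩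
      intro p hp
      rcases List.mem_cons.mp hp with rfl | hp
      · intro hps
        exact ‹¬ PySem.Chars.startswith s t = true› ((PySem.Chars.startswith_iff s t).mpr hps)
      · exact hpre p hp

lemma prefix_drop_infix {t cs : List Char} {j : Nat} (h : t <+: cs.drop j) : t <:+: cs := by
  rw [← PySem.Chars.isIn_iff_infix, ← PySem.Chars.exists_prefix_drop_iff_isIn]
  exact ⟨j, h⟩

lemma posScan_none {cs : List Char} (h : posScan cs = none) :
    ∀ j, firstTermAt AREA_TERMS (cs.drop j) = none := by
  induction cs with
  | nil => intro j; simp only [List.drop_nil]; decide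
  | cons c rest ih =>
    intro j
    simp only [posScan] at h
    split at h
    · exact absurd h (by simp)
    · cases j with
      | zero => simpa using ‹firstTermAt AREA_TERMS (c :: rest) = none›
      | succ j => simpa using ih h j

lemma posScan_some {cs : List Char} {r : String} (h : posScan cs = some r) :
    ∃ i0 : Nat, firstTermAt AREA_TERMS (cs.drop i0) = some r ∧
      ∀ j < i0, firstTermAt AREA_TERMS (cs.drop j) = none := by
  induction cs with
  | nil => simp [posScan] at h
  | cons c rest ih =>
    simp only [posScan] at h
    split at h
    · exact ⟨0, by simpa using (h ▸ ‹firstTermAt AREA_TERMS (c :: rest) = some _›), by omega⟩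
    · obtain ⟨i0, hs, hn⟩ := ih h
      refine ⟨i0 + 1, by simpa using hs, ?_⟩
      intro j hj
      cases j with
      | zero => simpa using ‹firstTermAt AREA_TERMS (c :: rest) = none›
      | succ j => simpa using hn j (by omega)

lemma foldl_step_min (k : Int) (c : String) (l1 l2 : List (Int × String))
    (h1 : ∀ q ∈ l1, k < q.1) (h2 : ∀ q ∈ l2, k ≤ q.1) :
    (l1 ++ (k, c) :: l2).foldl pvStep none = some (k, c) := by
  rw [List.foldl_append]
  have aux1 : ∀ (l : List (Int × String)) (acc : Option (Int × String)),
      (∀ q ∈ l, k < q.1) → (acc = none ∨ ∃ q, acc = some q ∧ k < q.1) →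
      (l.foldl pvStep acc = none ∨ ∃ q, l.foldl pvStep acc = some q ∧ k < q.1) := by
    intro l
    induction l with
    | nil => intro acc _ hacc; exact hacc
    | cons x t iht =>
      intro acc hl hacc
      refine iht _ (fun q hq => hl q (List.mem_cons_of_mem _ hq)) ?_
      rcases hacc with rfl | ⟨q, rfl, hq⟩
      · exact Or.inr ⟨x, rfl, hl x (List.mem_cons_self)⟩
      · simp only [pvStep]
        split
        · exact Or.inr ⟨x, rfl, hl x (List.mem_cons_self)⟩
        · exact Or.inr ⟨q, rfl, hq⟩
  have aux2 : ∀ (l : List (Int × String)), (∀ q ∈ l, k ≤ q.1) →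
      l.foldl pvStep (some (k, c)) = some (k, c) := by
    intro l
    induction l with
    | nil => intro _; rfl
    | cons x t iht =>
      intro hl
      have hx : ¬ x.1 < (k, c).1 := by
        have := hl x (List.mem_cons_self); simp; omega
      simp only [List.foldl_cons, pvStep, if_neg hx]
      exact iht (fun q hq => hl q (List.mem_cons_of_mem _ hq))
  rcases aux1 l1 none h1 (Or.inl rfl) with hn | ⟨q, hq, hkq⟩
  · rw [List.foldl_cons, hn]
    exact aux2 l2 h2
  · rw [List.foldl_cons, hq]
    simp only [pvStep, if_pos hkq]
    exact aux2 l2 h2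

theorem merge_area_core (cs : List Char) (idx : Int) :
    (let hits := -- Python variable `matches`
     AREA_TERMS.foldl (fun acc tc =>
        let position := PySem.Chars.find cs tc.1
        if 0 ≤ position then acc ++ [(position, tc.2)] else acc) ([] : List (Int × String))
     if hits.isEmpty then "Unspecified_" ++ PySem.Int.toStr idx
     else ((PySem.List.sorted hits (fun it => it.1)).headD (0, "")).2)
    = (match posScan cs with
       | some r => r
       | none => "Unspecified_" ++ PySem.Int.toStr idx) := by
  simp only [matches_eq, List.nil_append]
  cases hps : posScan cs with
  | none =>
    have hnone := posScan_none hps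
    have hall : ∀ p ∈ AREA_TERMS, pvHit cs p = none := by
      intro p hp
      unfold pvHit
      rw [if_neg]
      intro hge
      obtain ⟨j, hj⟩ := (PySem.Chars.exists_prefix_drop_iff_isIn p.1 cs).mpr
        ((PySem.Chars.isIn_iff_infix _ _).mpr ((PySem.Chars.find_nonneg_iff cs p.1).mp hge))
      exact firstTermAt_none (hnone j) p hp hj
    have hnil : List.filterMap (pvHit cs) AREA_TERMS = [] :=
      List.filterMap_eq_nil_iff.mpr hall
    simp [hnil]
  | some r =>
    obtain ⟨i0, hsome, hlt⟩ := posScan_some hps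
    obtain ⟨pre, t, c, post, hts, hr, hpref, hpre⟩ := firstTermAt_some hsome
    have F1 : ∀ p ∈ AREA_TERMS, 0 ≤ PySem.Chars.find cs p.1 →
        (i0 : Int) ≤ PySem.Chars.find cs p.1 := by
      intro p hp hge
      by_contra hltf
      push Not at hltf
      have hsp := PySem.Chars.find_spec hge
      have hcast : ((PySem.Chars.find cs p.1).toNat : Int) = PySem.Chars.find cs p.1 :=
        Int.toNat_of_nonneg hge
      have hjlt : (PySem.Chars.find cs p.1).toNat < i0 := by omega
      exact firstTermAt_none (hlt _ hjlt) p hp hsp.1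
    have hpmem : (t, c) ∈ AREA_TERMS := by rw [hts]; simp
    have hge0 : 0 ≤ PySem.Chars.find cs t :=
      (PySem.Chars.find_nonneg_iff cs t).mpr (prefix_drop_infix hpref)
    have hsp := PySem.Chars.find_spec hge0
    have hle : (PySem.Chars.find cs t).toNat ≤ i0 := by
      by_contra hgt
      push Not at hgt
      exact hsp.2 i0 hgt hpref
    have hcast : ((PySem.Chars.find cs t).toNat : Int) = PySem.Chars.find cs t :=
      Int.toNat_of_nonneg hge0
    have F2 : PySem.Chars.find cs t = (i0 : Int) := by
      have h1 : (i0 : Int) ≤ PySem.Chars.find cs t := F1 (t, c) hpmem hge0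
      omega
    have hhit : pvHit cs (t, c) = some ((i0 : Int), c) := by
      simp [pvHit, F2]
    rw [hts, List.filterMap_append, List.filterMap_cons, hhit]
    have hl1 : ∀ q ∈ List.filterMap (pvHit cs) pre, (i0 : Int) < q.1 := by
      intro q hq
      obtain ⟨p, hppre, hpq⟩ := List.mem_filterMap.mp hq
      have hpA : p ∈ AREA_TERMS := by rw [hts]; exact List.mem_append_left _ hppre
      simp only [pvHit] at hpq
      split at hpq
      next hge =>
        cases hpq
        have hge' : (i0 : Int) ≤ PySem.Chars.find cs p.1 := F1 p hpA hge
        rcases lt_or_eq_of_le hge' with hlt' | heq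
        · simpa using hlt'
        · exfalso
          have hspp := PySem.Chars.find_spec hge
          have hto : (PySem.Chars.find cs p.1).toNat = i0 := by omega
          exact hpre p hppre (hto ▸ hspp.1)
      next hge => cases hpq
    have hl2 : ∀ q ∈ List.filterMap (pvHit cs) post, (i0 : Int) ≤ q.1 := by
      intro q hq
      obtain ⟨p, hppost, hpq⟩ := List.mem_filterMap.mp hq
      have hpA : p ∈ AREA_TERMS := by
        rw [hts]; exact List.mem_append_right _ (List.mem_cons_of_mem _ hppost)
      simp only [pvHit] at hpq
      split at hpq
      next hge =>
        cases hpq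
        simpa using F1 p hpA hge
      next hge => cases hpq
    have hfold := foldl_step_min (i0 : Int) c _ _ hl1 hl2
    have hhead := head_sorted_eq_foldl_step
      (List.filterMap (pvHit cs) pre ++ ((i0 : Int), c) :: List.filterMap (pvHit cs) post)
    rw [hfold] at hhead
    have hne : (List.filterMap (pvHit cs) pre ++
        ((i0 : Int), c) :: List.filterMap (pvHit cs) post).isEmpty = false := by simp
    rw [if_neg (by simp [hne])]
    rw [List.headD_eq_head?_getD, hhead]
    simp [hr]

-- ===== VERDICT (by name: the statement is the Claim_ definition above) =====
theorem merge_area_py_spec : Claim_equal_merge_area_py := by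
  intro observation sequential_index _
  unfold Spec_merge_area_py merge_area_py merge_area_py_alt
  exact merge_area_core (PySem.Chars.lower observation.toList) sequential_index
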